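-- pv_equiv track=rewrite | github.com/lukacslacko/csaszar | rotation_z6.py | link_is_cycle
-- ===== SOURCE A (Python) =====
-- def link_is_cycle(vertex, faces_containing):
--     link_edges, link_verts = [], set()
--     for face in faces_containing:
--         opp = [x for x in face if x != vertex]
--         link_edges.append(tuple(sorted(opp)))
--         link_verts.update(opp)
--     deg = {v: 0 for v in link_verts}
--     for (a, b) in link_edges:
--         deg[a] += 1; deg[b] += 1
--     if any(d != 2 for d in deg.values()): return False
--     adj = {v: [] for v in link_verts}
--     for (a, b) in link_edges:
--         adj[a].append(b); adj[b].append(a)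
--     start = next(iter(link_verts))
--     seen = {start}; stk = [start]
--     while stk:
--         u = stk.pop()
--         for w in adj[u]:
--             if w not in seen:
--                 seen.add(w); stk.append(w)
--     return len(seen) == len(link_verts)
-- ===== SOURCE B (Python) =====
-- def link_is_cycle(vertex, faces_containing):
--     link_edges, link_verts = [], set()
--     for face in faces_containing:
--         opp = [x for x in face if x != vertex]
--         link_edges.append(tuple(sorted(opp)))
--         link_verts.update(opp)
--     deg = {}
--     for (a, b) in link_edges:
--         deg[a] = deg.get(a, 0) + 1
--         deg[b] = deg.get(b, 0) + 1
--     if any(deg.get(v, 0) != 2 for v in link_verts):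
--         return False
--     start = next(iter(link_verts))
--     reached = {start}
--     for _ in range(len(link_verts)):
--         grown = set(reached)
--         for (a, b) in link_edges:
--             if a in reached:
--                 grown.add(b)
--             if b in reached:
--                 grown.add(a)
--         reached = grown
--     return len(reached) == len(link_verts)
-- ===== Notes on version B (the rewrite author's own statement) =====
-- stated objective: alternative
-- what changed: The connectivity test is re-done as a bounded frontier closure computed directly over the edge list (no adjacency dict, no explicit DFS stack), and the degree check uses a dict built with get-defaults instead of a pre-seeded zero dict.
import Mathlib
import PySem

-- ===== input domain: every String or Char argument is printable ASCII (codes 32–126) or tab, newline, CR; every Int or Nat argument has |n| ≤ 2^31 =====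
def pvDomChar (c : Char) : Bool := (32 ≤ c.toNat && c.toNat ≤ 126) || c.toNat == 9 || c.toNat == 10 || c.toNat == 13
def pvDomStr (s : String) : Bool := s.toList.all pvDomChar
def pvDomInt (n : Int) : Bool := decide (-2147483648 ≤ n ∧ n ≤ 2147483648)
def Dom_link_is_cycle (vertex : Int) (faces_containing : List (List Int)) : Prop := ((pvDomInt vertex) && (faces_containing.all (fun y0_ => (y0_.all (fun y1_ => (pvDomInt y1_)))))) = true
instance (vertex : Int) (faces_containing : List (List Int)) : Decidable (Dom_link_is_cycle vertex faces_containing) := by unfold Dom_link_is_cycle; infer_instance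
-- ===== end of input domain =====

-- B replaces A's adjacency-dict stack DFS by a bounded frontier closure computed directly
-- over the edge list (alternative decomposition, similar cost); return values agree on Pre_.

-- ===== PORT A =====
-- stage 1: build (link_edges, link_verts)
def stageA (vertex : Int) (faces_containing : List (List Int)) :
    List (List Int) × PySem.Set Int :=
  faces_containing.foldl
    (fun (p : List (List Int) × PySem.Set Int) face =>
      let opp := face.filter (fun x => decide (x ≠ vertex))
      (p.1 ++ [PySem.List.sorted opp (fun x => x) false], PySem.Set.update p.2 opp))
    ([], PySem.Set.empty)

-- deg = {v: 0 for v in link_verts}; then deg[a] += 1; deg[b] += 1 per edge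
-- (an edge that is not a 2-list raises ValueError on unpacking in Python; Pre_ excludes it)
def degA (link_edges : List (List Int)) (link_verts : PySem.Set Int) : PySem.Dict Int Int :=
  link_edges.foldl
    (fun d e =>
      match e with
      | [a, b] => (d.modify a 0 (· + 1)).modify b 0 (· + 1)
      | _ => d)
    (link_verts.foldl (fun d v => d.insert v 0) PySem.Dict.empty)

-- adj = {v: [] for v in link_verts}; then adj[a].append(b); adj[b].append(a)
def adjA (link_edges : List (List Int)) (link_verts : PySem.Set Int) :
    PySem.Dict Int (List Int) :=
  link_edges.foldl
    (fun d e =>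
      match e with
      | [a, b] => (d.modify a [] (· ++ [b])).modify b [] (· ++ [a])
      | _ => d)
    (link_verts.foldl (fun d v => d.insert v ([] : List Int)) PySem.Dict.empty)

-- while stk: u = stk.pop(); for w in adj[u]: if w not in seen: seen.add(w); stk.append(w)
-- stack stored top-first (Python appends/pops at the END); fuel bounds the loop,
-- one pop per iteration, at most |link_verts| pushes ever happen
def dfsLoopA (adj : PySem.Dict Int (List Int)) :
    Nat → PySem.Set Int → List Int → PySem.Set Int
  | 0, seen, _ => seen
  | fuel + 1, seen, stk =>
    match stk with
    | [] => seen
    | u :: rest =>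
      let p := (adj.getD u []).foldl
        (fun (q : PySem.Set Int × List Int) w =>
          if PySem.Set.contains q.1 w then q else (PySem.Set.add q.1 w, w :: q.2))
        (seen, rest)
      dfsLoopA adj fuel p.1 p.2

def link_is_cycle (vertex : Int) (faces_containing : List (List Int)) : Bool :=
  let st := stageA vertex faces_containing
  if (degA st.1 st.2).values.any (fun dv => decide (dv ≠ 2)) then false
  else
    match st.2 with
    | [] => false   -- next(iter(∅)) raises StopIteration in Python; Pre_ excludes it
    | start :: _ =>
      PySem.Set.len
          (dfsLoopA (adjA st.1 st.2) st.2.length (PySem.Set.ofList [start]) [start])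
        == PySem.Set.len st.2

-- ===== PORT B =====
-- stage 1 is the same loop as in A (Source B keeps it verbatim)
def stageB (vertex : Int) (faces_containing : List (List Int)) :
    List (List Int) × PySem.Set Int :=
  faces_containing.foldl
    (fun (p : List (List Int) × PySem.Set Int) face =>
      let opp := face.filter (fun x => decide (x ≠ vertex))
      (p.1 ++ [PySem.List.sorted opp (fun x => x) false], PySem.Set.update p.2 opp))
    ([], PySem.Set.empty)

-- deg = {}; deg[a] = deg.get(a, 0) + 1; deg[b] = deg.get(b, 0) + 1
def degB (link_edges : List (List Int)) : PySem.Dict Int Int :=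
  link_edges.foldl
    (fun d e =>
      match e with
      | [a, b] => (d.modify a 0 (· + 1)).modify b 0 (· + 1)
      | _ => d)
    PySem.Dict.empty

-- grown = set(reached); for (a,b) in link_edges: if a in reached: grown.add(b); if b in reached: grown.add(a)
def growB (link_edges : List (List Int)) (reached : PySem.Set Int) : PySem.Set Int :=
  link_edges.foldl
    (fun g e =>
      match e with
      | [a, b] =>
        let g := if PySem.Set.contains reached a then PySem.Set.add g b else g
        if PySem.Set.contains reached b then PySem.Set.add g a else g
      | _ => g)
    reached

def link_is_cycle_alt (vertex : Int) (faces_containing : List (List Int)) : Bool :=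
  let st := stageB vertex faces_containing
  if st.2.any (fun v => decide ((degB st.1).getD v 0 ≠ 2)) then false
  else
    match st.2 with
    | [] => false   -- next(iter(∅)) raises StopIteration in Python; Pre_ excludes it
    | start :: _ =>
      PySem.Set.len
          ((List.range st.2.length).foldl (fun r _ => growB st.1 r)  -- range(len(link_verts))
            (PySem.Set.ofList [start]))
        == PySem.Set.len st.2

-- ===== PRECONDITION & SPEC =====
-- Pre_ excludes exactly the inputs where Python A raises: an empty faces list
-- (StopIteration at next(iter(link_verts))) and any face whose non-vertex part does not
-- have exactly 2 entries (ValueError unpacking the edge tuple).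
def Pre_link_is_cycle (vertex : Int) (faces_containing : List (List Int)) : Prop :=
  faces_containing ≠ [] ∧
    ∀ face ∈ faces_containing, (face.filter (fun x => decide (x ≠ vertex))).length = 2

instance (vertex : Int) (faces_containing : List (List Int)) :
    Decidable (Pre_link_is_cycle vertex faces_containing) := by
  unfold Pre_link_is_cycle; infer_instance

def pvWitness_link_is_cycle : Int × List (List Int) :=
  (0, [[0, 1, 2], [0, 2, 3], [0, 3, 1]])

def Spec_link_is_cycle (vertex : Int) (faces_containing : List (List Int)) (out : Bool) : Prop :=
  out = link_is_cycle_alt vertex faces_containing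

instance (vertex : Int) (faces_containing : List (List Int)) (out : Bool) :
    Decidable (Spec_link_is_cycle vertex faces_containing out) := by
  unfold Spec_link_is_cycle; infer_instance

-- ===== CLAIM (what is proved, stated in full; the proofs are below) =====
def Claim_equal_link_is_cycle : Prop := ∀ (vertex : Int) (faces_containing : List (List Int)), Dom_link_is_cycle vertex faces_containing → Pre_link_is_cycle vertex faces_containing → Spec_link_is_cycle vertex faces_containing (link_is_cycle vertex faces_containing)

-- ===== LEMMAS AND PROOFS =====

-- the two endpoints of every edge, in both directions / flattened
def pvPairs (E : List (List Int)) : List (Int × Int) :=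
  E.flatMap (fun e => match e with | [a, b] => [(a, b), (b, a)] | _ => [])

def pvFlat (E : List (List Int)) : List Int :=
  E.flatMap (fun e => match e with | [a, b] => [a, b] | _ => [])

def pvReach (E : List (List Int)) (s v : Int) : Prop :=
  Relation.ReflTransGen (fun a b => (a, b) ∈ pvPairs E) s v

lemma mem_pairs_flat {E : List (List Int)} {a b : Int} (h : (a, b) ∈ pvPairs E) :
    a ∈ pvFlat E ∧ b ∈ pvFlat E := by
  unfold pvPairs at h
  simp only [List.mem_flatMap] at h
  obtain ⟨e, he, hab⟩ := h
  constructor <;>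
  · unfold pvFlat
    simp only [List.mem_flatMap]
    refine ⟨e, he, ?_⟩
    rcases e with _ | ⟨x, _ | ⟨y, _ | ⟨z, t⟩⟩⟩ <;> simp_all
    tauto

-- ----- stage 1 -----
lemma stageB_eq_stageA : stageB = stageA := rfl

lemma stage_fold_fst (vertex : Int) (fs : List (List Int)) :
    ∀ acc : List (List Int) × PySem.Set Int,
      (fs.foldl
        (fun (p : List (List Int) × PySem.Set Int) face =>
          let opp := face.filter (fun x => decide (x ≠ vertex))
          (p.1 ++ [PySem.List.sorted opp (fun x => x) false], PySem.Set.update p.2 opp))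
        acc).1 =
      acc.1 ++ fs.map (fun f => PySem.List.sorted (f.filter (fun x => decide (x ≠ vertex)))
        (fun x => x) false) := by
  induction fs with
  | nil => intro acc; simp
  | cons f t ih =>
    intro acc
    simp only [List.foldl_cons, List.map_cons]
    rw [ih]
    simp

lemma stage_fold_snd_mem (vertex : Int) (fs : List (List Int)) :
    ∀ (acc : List (List Int) × PySem.Set Int) (y : Int),
      (y ∈ (fs.foldl
        (fun (p : List (List Int) × PySem.Set Int) face =>
          let opp := face.filter (fun x => decide (x ≠ vertex))
          (p.1 ++ [PySem.List.sorted opp (fun x => x) false], PySem.Set.update p.2 opp))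
        acc).2 ↔ y ∈ acc.2 ∨ ∃ f ∈ fs, y ∈ f.filter (fun x => decide (x ≠ vertex))) := by
  induction fs with
  | nil => intro acc y; simp
  | cons f t ih =>
    intro acc y
    simp only [List.foldl_cons]
    rw [ih]
    simp only [PySem.Set.mem_update]
    simp only [List.mem_cons]
    constructor
    · rintro ((h | h) | ⟨g, hg, hy⟩)
      · exact Or.inl h
      · exact Or.inr ⟨f, Or.inl rfl, h⟩
      · exact Or.inr ⟨g, Or.inr hg, hy⟩
    · rintro (h | ⟨g, (rfl | hg), hy⟩)
      · exact Or.inl (Or.inl h)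
      · exact Or.inl (Or.inr hy)
      · exact Or.inr ⟨g, hg, hy⟩

lemma stage_fold_snd_nodup (vertex : Int) (fs : List (List Int)) :
    ∀ acc : List (List Int) × PySem.Set Int, acc.2.Nodup →
      (fs.foldl
        (fun (p : List (List Int) × PySem.Set Int) face =>
          let opp := face.filter (fun x => decide (x ≠ vertex))
          (p.1 ++ [PySem.List.sorted opp (fun x => x) false], PySem.Set.update p.2 opp))
        acc).2.Nodup := by
  induction fs with
  | nil => intro acc h; exact h
  | cons f t ih =>
    intro acc h
    simp only [List.foldl_cons]
    exact ih _ (PySem.Set.nodup_update _ _ h)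

lemma stageA_fst (vertex : Int) (fs : List (List Int)) :
    (stageA vertex fs).1 =
      fs.map (fun f => PySem.List.sorted (f.filter (fun x => decide (x ≠ vertex)))
        (fun x => x) false) := by
  unfold stageA
  rw [stage_fold_fst]
  rfl

lemma stageA_snd_mem (vertex : Int) (fs : List (List Int)) (y : Int) :
    y ∈ (stageA vertex fs).2 ↔
      ∃ f ∈ fs, y ∈ f.filter (fun x => decide (x ≠ vertex)) := by
  unfold stageA
  rw [stage_fold_snd_mem]
  simp [PySem.Set.empty]

lemma stageA_snd_nodup (vertex : Int) (fs : List (List Int)) :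
    (stageA vertex fs).2.Nodup := by
  unfold stageA
  exact stage_fold_snd_nodup vertex fs _ (by simp [PySem.Set.empty])

lemma mem_match_pair {e : List Int} {x : Int}
    (h : x ∈ (match e with | [a, b] => [a, b] | _ => ([] : List Int))) : x ∈ e := by
  rcases e with _ | ⟨a, _ | ⟨b, _ | ⟨c, t⟩⟩⟩ <;> simp_all

lemma flat_subset_verts (vertex : Int) (fs : List (List Int)) :
    ∀ x ∈ pvFlat (stageA vertex fs).1, x ∈ (stageA vertex fs).2 := by
  intro x hx
  unfold pvFlat at hx
  simp only [List.mem_flatMap] at hx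
  obtain ⟨e, he, hxe⟩ := hx
  have hxe' := mem_match_pair hxe
  rw [stageA_fst] at he
  simp only [List.mem_map] at he
  obtain ⟨f, hf, rfl⟩ := he
  rw [(PySem.List.sorted_perm _ _ _).mem_iff] at hxe'
  exact (stageA_snd_mem vertex fs x).mpr ⟨f, hf, hxe'⟩

-- ----- degree stage -----
lemma deg_fold_flat (E : List (List Int)) :
    ∀ d : PySem.Dict Int Int,
      E.foldl (fun d e =>
        match e with
        | [a, b] => (d.modify a 0 (· + 1)).modify b 0 (· + 1)
        | _ => d) d
      = (pvFlat E).foldl (fun d x => d.modify x 0 (· + 1)) d := by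
  induction E with
  | nil => intro d; rfl
  | cons e t ih =>
    intro d
    rcases e with _ | ⟨a, _ | ⟨b, _ | ⟨c, t2⟩⟩⟩ <;>
      simp only [pvFlat, List.flatMap_cons, List.foldl_cons, List.foldl_append,
        List.nil_append, List.foldl_nil] <;>
      rw [← pvFlat] <;> exact ih _

lemma getD_insert_zero_fold (V : List Int) :
    ∀ (d : PySem.Dict Int Int), (∀ x, d.getD x 0 = 0) →
      ∀ x, (V.foldl (fun d v => d.insert v (0 : Int)) d).getD x 0 = 0 := by
  induction V with
  | nil => intro d h x; exact h x
  | cons v t ih =>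
    intro d h x
    simp only [List.foldl_cons]
    refine ih _ (fun y => ?_) x
    rw [PySem.Dict.getD_insert]
    split <;> simp [h]

lemma getD_degA (E : List (List Int)) (V : PySem.Set Int) (x : Int) :
    (degA E V).getD x 0 = ((pvFlat E).count x : Int) := by
  unfold degA
  rw [deg_fold_flat, PySem.Dict.getD_foldl_modify_add_one,
    getD_insert_zero_fold V _ (fun y => PySem.Dict.getD_empty _ _) x]
  simp

lemma getD_degB (E : List (List Int)) (x : Int) :
    (degB E).getD x 0 = ((pvFlat E).count x : Int) := by
  unfold degB
  rw [deg_fold_flat, PySem.Dict.getD_foldl_modify_add_one]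
  simp [PySem.Dict.getD_empty]

lemma set_update_of_subset (s : PySem.Set Int) (xs : List Int) (h : ∀ x ∈ xs, x ∈ s) :
    PySem.Set.update s xs = s := by
  rw [PySem.Set.update_eq_append_filter]
  have : (PySem.Set.ofList xs).filter (fun y => !PySem.Set.contains s y) = [] := by
    rw [List.filter_eq_nil_iff]
    intro y hy
    have hm : y ∈ s := h y ((PySem.Set.mem_ofList _ _).mp hy)
    simp [hm]
  rw [this, List.append_nil]

lemma keys_degA (E : List (List Int)) (V : PySem.Set Int) (hV : V.Nodup)
    (hsub : ∀ x ∈ pvFlat E, x ∈ V) : (degA E V).keys = V := by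
  unfold degA
  rw [deg_fold_flat, PySem.Dict.keys_foldl_modify, PySem.Dict.keys_foldl_insert,
    PySem.Dict.keys_empty, PySem.Set.update_nil_left,
    PySem.Set.ofList_eq_self_of_nodup V hV, set_update_of_subset V (pvFlat E) hsub]

lemma any_congr' (l : List Int) (f g : Int → Bool) (h : ∀ x ∈ l, f x = g x) :
    l.any f = l.any g := by
  induction l with
  | nil => rfl
  | cons a t ih =>
    simp only [List.any_cons, h a (by simp)]
    rw [ih (fun x hx => h x (by simp [hx]))]

lemma guard_eq (E : List (List Int)) (V : PySem.Set Int) (hV : V.Nodup)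
    (hsub : ∀ x ∈ pvFlat E, x ∈ V) :
    (degA E V).values.any (fun dv => decide (dv ≠ 2)) =
      V.any (fun v => decide ((degB E).getD v 0 ≠ 2)) := by
  have hk := keys_degA E V hV hsub
  have hnd : (degA E V).keys.Nodup := by rw [hk]; exact hV
  rw [PySem.Dict.values_eq_map_keys _ hnd 0, hk, List.any_map]
  apply any_congr'
  intro x _
  simp only [Function.comp_apply]
  rw [getD_degA, getD_degB]

-- ----- adjacency -----
lemma adj_fold_pairs (E : List (List Int)) :
    ∀ d : PySem.Dict Int (List Int),
      E.foldl (fun d e =>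
        match e with
        | [a, b] => (d.modify a [] (· ++ [b])).modify b [] (· ++ [a])
        | _ => d) d
      = (pvPairs E).foldl (fun d p => d.modify p.1 [] (· ++ [p.2])) d := by
  induction E with
  | nil => intro d; rfl
  | cons e t ih =>
    intro d
    rcases e with _ | ⟨a, _ | ⟨b, _ | ⟨c, t2⟩⟩⟩ <;>
      simp only [pvPairs, List.flatMap_cons, List.foldl_cons, List.foldl_append,
        List.nil_append, List.foldl_nil] <;>
      rw [← pvPairs] <;> exact ih _

lemma getD_insert_nil_fold (V : List Int) :
    ∀ (d : PySem.Dict Int (List Int)), (∀ x, d.getD x [] = []) →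
      ∀ x, (V.foldl (fun d v => d.insert v ([] : List Int)) d).getD x [] = [] := by
  induction V with
  | nil => intro d h x; exact h x
  | cons v t ih =>
    intro d h x
    simp only [List.foldl_cons]
    refine ih _ (fun y => ?_) x
    rw [PySem.Dict.getD_insert]
    split <;> simp [h]

lemma mem_adjA (E : List (List Int)) (V : PySem.Set Int) (u w : Int) :
    w ∈ (adjA E V).getD u [] ↔ (u, w) ∈ pvPairs E := by
  unfold adjA
  rw [adj_fold_pairs, PySem.Dict.getD_foldl_modify_append,
    getD_insert_nil_fold V _ (fun y => PySem.Dict.getD_empty _ _) u]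
  simp only [List.nil_append, List.mem_map, List.mem_filter]
  constructor
  · rintro ⟨p, ⟨hp, hpu⟩, hpw⟩
    obtain ⟨p1, p2⟩ := p
    simp only at hpw
    simp only [beq_iff_eq] at hpu
    subst hpu; subst hpw
    exact hp
  · intro h
    exact ⟨(u, w), ⟨h, by simp⟩, rfl⟩

-- ----- DFS side -----
lemma push_fst (ws : List Int) :
    ∀ (seen : PySem.Set Int) (acc : List Int),
      (ws.foldl (fun (q : PySem.Set Int × List Int) w =>
        if PySem.Set.contains q.1 w then q else (PySem.Set.add q.1 w, w :: q.2))
        (seen, acc)).1 = PySem.Set.update seen ws := by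
  induction ws with
  | nil => intro seen acc; simp [PySem.Set.update]
  | cons w t ih =>
    intro seen acc
    simp only [List.foldl_cons]
    rw [PySem.Set.update_cons]
    by_cases h : PySem.Set.contains seen w = true
    · rw [if_pos h, PySem.Set.add_of_mem ((PySem.Set.contains_iff _ _).mp h)]
      exact ih seen acc
    · rw [if_neg h]
      exact ih _ _

lemma push_snd_mem (ws : List Int) :
    ∀ (seen : PySem.Set Int) (acc : List Int) (v : Int),
      (v ∈ (ws.foldl (fun (q : PySem.Set Int × List Int) w =>
        if PySem.Set.contains q.1 w then q else (PySem.Set.add q.1 w, w :: q.2))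
        (seen, acc)).2 ↔ v ∈ acc ∨ (v ∈ ws ∧ v ∉ seen)) := by
  induction ws with
  | nil => intro seen acc v; simp
  | cons w t ih =>
    intro seen acc v
    simp only [List.foldl_cons]
    by_cases h : PySem.Set.contains seen w = true
    · have hw : w ∈ seen := (PySem.Set.contains_iff _ _).mp h
      rw [if_pos h, ih]
      have hvw : v = w → v ∈ seen := fun hv => hv ▸ hw
      simp only [List.mem_cons]
      tauto
    · have hw : w ∉ seen := fun hm => h ((PySem.Set.contains_iff _ _).mpr hm)
      rw [if_neg h, ih]
      simp only [List.mem_cons, PySem.Set.mem_add]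
      by_cases hv : v = w
      · subst hv; tauto
      · tauto

lemma length_filter_not_append (V : List Int) (hV : V.Nodup) (s : List Int) (w : Int)
    (hwV : w ∈ V) (hws : w ∉ s) :
    (V.filter (fun x => decide (x ∉ s ++ [w]))).length + 1 =
      (V.filter (fun x => decide (x ∉ s))).length := by
  have h1 : V.filter (fun x => decide (x ∉ s ++ [w])) =
      (V.filter (fun x => decide (x ∉ s))).filter (fun x => decide (x ≠ w)) := by
    rw [List.filter_filter]
    apply List.filter_congr
    intro x _
    by_cases h1 : x ∈ s <;> by_cases h2 : x = w <;> simp [h1, h2, List.mem_append]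
  have hnd := hV.filter (fun x => decide (x ∉ s))
  have hw : w ∈ V.filter (fun x => decide (x ∉ s)) := by
    simp [List.mem_filter, hwV, hws]
  have hpos := List.length_pos_of_mem hw
  rw [h1]
  have h2 : (fun x : Int => decide (x ≠ w)) = (fun x : Int => x != w) := by
    funext x; by_cases h : x = w <;> simp [h, bne]
  rw [h2, ← List.Nodup.erase_eq_filter hnd, List.length_erase_of_mem hw]
  omega

lemma push_measure (ws : List Int) (V : List Int) (hV : V.Nodup) :
    ∀ (seen : PySem.Set Int) (acc : List Int), (∀ w ∈ ws, w ∈ V) →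
      (V.filter (fun x => decide (x ∉ (ws.foldl (fun (q : PySem.Set Int × List Int) w =>
          if PySem.Set.contains q.1 w then q else (PySem.Set.add q.1 w, w :: q.2))
          (seen, acc)).1))).length +
        (ws.foldl (fun (q : PySem.Set Int × List Int) w =>
          if PySem.Set.contains q.1 w then q else (PySem.Set.add q.1 w, w :: q.2))
          (seen, acc)).2.length =
      (V.filter (fun x => decide (x ∉ seen))).length + acc.length := by
  induction ws with
  | nil => intro seen acc _; rfl
  | cons w t ih =>
    intro seen acc hws
    simp only [List.foldl_cons]
    by_cases h : PySem.Set.contains seen w = true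
    · rw [if_pos h]
      exact ih seen acc (fun x hx => hws x (List.mem_cons_of_mem _ hx))
    · rw [if_neg h]
      have hw : w ∉ seen := fun hm => h ((PySem.Set.contains_iff _ _).mpr hm)
      rw [ih _ _ (fun x hx => hws x (List.mem_cons_of_mem _ hx))]
      rw [PySem.Set.add_of_not_mem hw]
      have := length_filter_not_append V hV seen w (hws w List.mem_cons_self) hw
      simp only [List.length_cons]
      omega

lemma seen_closed_reach (E : List (List Int)) (start : Int) (seen : List Int)
    (hs : start ∈ seen)
    (hcl : ∀ u w, u ∈ seen → (u, w) ∈ pvPairs E → w ∈ seen) :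
    ∀ v, pvReach E start v → v ∈ seen := by
  intro v h
  induction h with
  | refl => exact hs
  | tail _ hR ih => exact hcl _ _ ih hR

lemma dfs_mem (E : List (List Int)) (adj : PySem.Dict Int (List Int)) (V : List Int)
    (start : Int)
    (hN : ∀ u w, w ∈ adj.getD u [] ↔ (u, w) ∈ pvPairs E)
    (hV : V.Nodup)
    (hRV : ∀ p ∈ pvPairs E, p.1 ∈ V ∧ p.2 ∈ V) :
    ∀ (fuel : Nat) (seen : PySem.Set Int) (stk : List Int),
      seen.Nodup →
      (∀ v ∈ stk, v ∈ seen) →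
      (∀ v ∈ seen, v ∈ V) →
      (∀ v ∈ seen, pvReach E start v) →
      start ∈ seen →
      (∀ u w, u ∈ seen → u ∉ stk → (u, w) ∈ pvPairs E → w ∈ seen) →
      (V.filter (fun x => decide (x ∉ seen))).length + stk.length ≤ fuel →
      (dfsLoopA adj fuel seen stk).Nodup ∧
        ∀ v, v ∈ dfsLoopA adj fuel seen stk ↔ pvReach E start v := by
  intro fuel
  induction fuel with
  | zero =>
    intro seen stk hnd hstk hsV hreach hstart hclosed hfuel
    have hstk0 : stk = [] := List.eq_nil_of_length_eq_zero (by omega)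
    subst hstk0
    refine ⟨hnd, fun v => ⟨fun hv => hreach v hv, fun hv => ?_⟩⟩
    exact seen_closed_reach E start seen hstart
      (fun u w hu hp => hclosed u w hu (by simp) hp) v hv
  | succ fuel ih =>
    intro seen stk hnd hstk hsV hreach hstart hclosed hfuel
    cases stk with
    | nil =>
      refine ⟨hnd, fun v => ⟨fun hv => hreach v hv, fun hv => ?_⟩⟩
      exact seen_closed_reach E start seen hstart
        (fun u w hu hp => hclosed u w hu (by simp) hp) v hv
    | cons u rest =>
      show (dfsLoopA adj fuel _ _).Nodup ∧ ∀ v, v ∈ dfsLoopA adj fuel _ _ ↔ _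
      have hwsV : ∀ w ∈ adj.getD u [], w ∈ V :=
        fun w hw => (hRV _ ((hN u w).mp hw)).2
      have huseen : u ∈ seen := hstk u (by simp)
      have hfst := push_fst (adj.getD u []) seen rest
      have hsnd := push_snd_mem (adj.getD u []) seen rest
      have hmeas := push_measure (adj.getD u []) V hV seen rest hwsV
      apply ih
      · rw [hfst]; exact PySem.Set.nodup_update _ _ hnd
      · intro v hv
        rcases (hsnd v).mp hv with h | ⟨h1, _⟩
        · rw [hfst]; exact (PySem.Set.mem_update _ _ _).mpr
            (Or.inl (hstk v (List.mem_cons_of_mem _ h)))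
        · rw [hfst]; exact (PySem.Set.mem_update _ _ _).mpr (Or.inr h1)
      · intro v hv
        rw [hfst] at hv
        rcases (PySem.Set.mem_update _ _ _).mp hv with h | h
        · exact hsV v h
        · exact hwsV v h
      · intro v hv
        rw [hfst] at hv
        rcases (PySem.Set.mem_update _ _ _).mp hv with h | h
        · exact hreach v h
        · exact Relation.ReflTransGen.tail (hreach u huseen) ((hN u v).mp h)
      · rw [hfst]; exact (PySem.Set.mem_update _ _ _).mpr (Or.inl hstart)
      · intro x w hx hnstk hp
        rw [hfst] at hx ⊢
        by_cases hxs : x ∈ seen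
        · by_cases hxu : x = u
          · subst hxu
            exact (PySem.Set.mem_update _ _ _).mpr (Or.inr ((hN x w).mpr hp))
          · have hxrest : x ∉ rest := fun hr => hnstk ((hsnd x).mpr (Or.inl hr))
            exact (PySem.Set.mem_update _ _ _).mpr
              (Or.inl (hclosed x w hxs (by simp [hxu, hxrest]) hp))
        · have hxws : x ∈ adj.getD u [] := by
            rcases (PySem.Set.mem_update _ _ _).mp hx with h | h
            · exact absurd h hxs
            · exact h
          exact absurd ((hsnd x).mpr (Or.inr ⟨hxws, hxs⟩)) hnstk
      · simp only [List.length_cons] at hfuel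
        omega

-- ----- closure side -----
lemma grow_eq_pairs (E : List (List Int)) (r : PySem.Set Int) :
    ∀ g : PySem.Set Int,
      E.foldl (fun g e =>
        match e with
        | [a, b] =>
          let g := if PySem.Set.contains r a then PySem.Set.add g b else g
          if PySem.Set.contains r b then PySem.Set.add g a else g
        | _ => g) g
      = (pvPairs E).foldl
          (fun g p => if PySem.Set.contains r p.1 then PySem.Set.add g p.2 else g) g := by
  induction E with
  | nil => intro g; rfl
  | cons e t ih =>
    intro g
    rcases e with _ | ⟨a, _ | ⟨b, _ | ⟨c, t2⟩⟩⟩ <;>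
      simp only [pvPairs, List.flatMap_cons, List.foldl_cons, List.foldl_append,
        List.nil_append, List.foldl_nil] <;>
      rw [← pvPairs] <;> exact ih _

lemma mem_pairs_fold (ps : List (Int × Int)) (r : PySem.Set Int) :
    ∀ (g : PySem.Set Int) (v : Int),
      v ∈ ps.foldl (fun g p => if PySem.Set.contains r p.1 then PySem.Set.add g p.2 else g) g ↔
        v ∈ g ∨ ∃ p ∈ ps, p.1 ∈ r ∧ v = p.2 := by
  induction ps with
  | nil => intro g v; simp
  | cons p t ih =>
    intro g v
    simp only [List.foldl_cons]
    rw [ih]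
    by_cases hc : PySem.Set.contains r p.1 = true
    · have hp1 : p.1 ∈ r := (PySem.Set.contains_iff _ _).mp hc
      simp only [if_pos hc, PySem.Set.mem_add, List.mem_cons]
      constructor
      · rintro ((h | h) | ⟨q, hq, hq1, hq2⟩)
        · exact Or.inl h
        · exact Or.inr ⟨p, Or.inl rfl, hp1, h⟩
        · exact Or.inr ⟨q, Or.inr hq, hq1, hq2⟩
      · rintro (h | ⟨q, (rfl | hq), hq1, hq2⟩)
        · exact Or.inl (Or.inl h)
        · exact Or.inl (Or.inr hq2)
        · exact Or.inr ⟨q, hq, hq1, hq2⟩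
    · have hp1 : p.1 ∉ r := fun hm => hc ((PySem.Set.contains_iff _ _).mpr hm)
      simp only [if_neg hc, List.mem_cons]
      constructor
      · rintro (h | ⟨q, hq, hq1, hq2⟩)
        · exact Or.inl h
        · exact Or.inr ⟨q, Or.inr hq, hq1, hq2⟩
      · rintro (h | ⟨q, (rfl | hq), hq1, hq2⟩)
        · exact Or.inl h
        · exact absurd hq1 hp1
        · exact Or.inr ⟨q, hq, hq1, hq2⟩

lemma mem_grow (E : List (List Int)) (r : PySem.Set Int) (v : Int) :
    v ∈ growB E r ↔ v ∈ r ∨ ∃ p ∈ pvPairs E, p.1 ∈ r ∧ v = p.2 := by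
  unfold growB
  rw [grow_eq_pairs]
  exact mem_pairs_fold (pvPairs E) r r v

lemma nodup_grow (E : List (List Int)) (r : PySem.Set Int) (h : r.Nodup) :
    (growB E r).Nodup := by
  unfold growB
  rw [grow_eq_pairs]
  have : ∀ (ps : List (Int × Int)) (g : PySem.Set Int), g.Nodup →
      (ps.foldl (fun g p => if PySem.Set.contains r p.1 then PySem.Set.add g p.2 else g)
        g).Nodup := by
    intro ps
    induction ps with
    | nil => intro g hg; exact hg
    | cons p t ih =>
      intro g hg
      simp only [List.foldl_cons]
      split
      · exact ih _ (PySem.Set.nodup_add _ _ hg)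
      · exact ih _ hg
  exact this _ r h

lemma grow_extend (E : List (List Int)) (r : PySem.Set Int) :
    ∃ t, growB E r = r ++ t := by
  unfold growB
  rw [grow_eq_pairs]
  have : ∀ (ps : List (Int × Int)) (g : PySem.Set Int), ∃ t,
      ps.foldl (fun g p => if PySem.Set.contains r p.1 then PySem.Set.add g p.2 else g) g
        = g ++ t := by
    intro ps
    induction ps with
    | nil => intro g; exact ⟨[], by simp⟩
    | cons p t ih =>
      intro g
      simp only [List.foldl_cons]
      split
      · by_cases hm : p.2 ∈ g
        · rw [PySem.Set.add_of_mem hm]; exact ih g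
        · rw [PySem.Set.add_of_not_mem hm]
          obtain ⟨u, hu⟩ := ih (g ++ [p.2])
          exact ⟨[p.2] ++ u, by rw [hu, List.append_assoc]⟩
      · exact ih g
  exact this _ r

lemma range_foldl_iterate (f : PySem.Set Int → PySem.Set Int) (n : Nat) (x : PySem.Set Int) :
    (List.range n).foldl (fun r _ => f r) x = f^[n] x := by
  induction n with
  | zero => rfl
  | succ n ih =>
    rw [List.range_succ, List.foldl_append, ih]
    show f (f^[n] x) = f^[n+1] x
    rw [Function.iterate_succ_apply']

lemma nodup_subset_length (l l' : List Int) (h : l.Nodup) (hs : ∀ x ∈ l, x ∈ l') :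
    l.length ≤ l'.length := by
  calc l.length = l.toFinset.card := (List.toFinset_card_of_nodup h).symm
    _ ≤ l'.toFinset.card := Finset.card_le_card
        (fun x hx => List.mem_toFinset.mpr (hs x (List.mem_toFinset.mp hx)))
    _ ≤ l'.length := l'.toFinset_card_le

lemma closure_mem (E : List (List Int)) (V : List Int) (start : Int)
    (hstart : start ∈ V)
    (hRV : ∀ p ∈ pvPairs E, p.1 ∈ V ∧ p.2 ∈ V) :
    ((growB E)^[V.length] [start]).Nodup ∧
      ∀ v, v ∈ (growB E)^[V.length] [start] ↔ pvReach E start v := by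
  have hsub0 : ∀ k, ∀ v ∈ (growB E)^[k] [start], v ∈ V := by
    intro k
    induction k with
    | zero => intro v hv; simp at hv; subst hv; exact hstart
    | succ k ih =>
      intro v hv
      rw [Function.iterate_succ_apply'] at hv
      rcases (mem_grow E _ v).mp hv with h | ⟨p, hp, _, rfl⟩
      · exact ih v h
      · exact (hRV p hp).2
  have hnd : ∀ k, ((growB E)^[k] [start]).Nodup := by
    intro k
    induction k with
    | zero => simp
    | succ k ih => rw [Function.iterate_succ_apply']; exact nodup_grow E _ ih
  have hstartmem : ∀ k, start ∈ (growB E)^[k] [start] := by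
    intro k
    induction k with
    | zero => simp
    | succ k ih =>
      rw [Function.iterate_succ_apply']
      exact (mem_grow E _ start).mpr (Or.inl ih)
  have hforward : ∀ k v, v ∈ (growB E)^[k] [start] → pvReach E start v := by
    intro k
    induction k with
    | zero => intro v hv; simp at hv; subst hv; exact Relation.ReflTransGen.refl
    | succ k ih =>
      intro v hv
      rw [Function.iterate_succ_apply'] at hv
      rcases (mem_grow E _ v).mp hv with h | ⟨p, hp, hp1, rfl⟩
      · exact ih v h
      · exact Relation.ReflTransGen.tail (ih p.1 hp1) (by simpa using hp)
  have hfix : ∃ j < V.length, growB E ((growB E)^[j] [start]) = (growB E)^[j] [start] := by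
    by_contra hcon
    have hcon' : ∀ j, j < V.length →
        growB E ((growB E)^[j] [start]) ≠ (growB E)^[j] [start] :=
      fun j hj hfix => hcon ⟨j, hj, hfix⟩
    have hgrow : ∀ j, j ≤ V.length → j + 1 ≤ ((growB E)^[j] [start]).length := by
      intro j
      induction j with
      | zero => intro _; simp
      | succ j ih =>
        intro hj
        have h1 := ih (by omega)
        obtain ⟨t, ht⟩ := grow_extend E ((growB E)^[j] [start])
        have hne := hcon' j (by omega)
        have htne : t ≠ [] := by
          rintro rfl
          exact hne (by simpa using ht)
        have hlt : 1 ≤ t.length := by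
          cases t with
          | nil => exact absurd rfl htne
          | cons a b => simp
        rw [Function.iterate_succ_apply', ht, List.length_append]
        omega
    have h2 := hgrow V.length le_rfl
    have h3 := nodup_subset_length _ V (hnd V.length) (hsub0 V.length)
    omega
  obtain ⟨j, hj, hfixj⟩ := hfix
  have hstab : (growB E)^[V.length] [start] = (growB E)^[j] [start] := by
    have hn : V.length = (V.length - j) + j := by omega
    rw [hn, Function.iterate_add_apply]
    exact Function.iterate_fixed hfixj (V.length - j)
  have hclosed : ∀ u w, u ∈ (growB E)^[V.length] [start] → (u, w) ∈ pvPairs E →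
      w ∈ (growB E)^[V.length] [start] := by
    intro u w hu hp
    rw [hstab] at hu ⊢
    rw [← hfixj]
    exact (mem_grow E _ w).mpr (Or.inr ⟨(u, w), hp, hu, rfl⟩)
  exact ⟨hnd V.length, fun v => ⟨hforward V.length v,
    fun hv => seen_closed_reach E start _ (hstartmem V.length) hclosed v hv⟩⟩

-- ----- assembling the two ports -----
lemma lens_eq (E : List (List Int)) (start : Int) (rest : List Int)
    (hV : (start :: rest : List Int).Nodup)
    (hsub : ∀ x ∈ pvFlat E, x ∈ (start :: rest : List Int)) :
    PySem.Set.len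
        (dfsLoopA (adjA E (start :: rest)) (start :: rest : List Int).length
          (PySem.Set.ofList [start]) [start]) =
      PySem.Set.len
        ((List.range (start :: rest : List Int).length).foldl (fun r _ => growB E r)
          (PySem.Set.ofList [start])) := by
  have hof : PySem.Set.ofList [start] = ([start] : List Int) :=
    PySem.Set.ofList_eq_self_of_nodup _ (by simp)
  have hstart : start ∈ (start :: rest : List Int) := List.mem_cons_self
  have hRV : ∀ p ∈ pvPairs E, p.1 ∈ (start :: rest : List Int) ∧
      p.2 ∈ (start :: rest : List Int) := by
    rintro ⟨a, b⟩ hp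
    obtain ⟨h1, h2⟩ := mem_pairs_flat hp
    exact ⟨hsub a h1, hsub b h2⟩
  have hdfs := dfs_mem E (adjA E (start :: rest)) (start :: rest) start
    (mem_adjA E (start :: rest)) hV hRV (start :: rest).length
    (PySem.Set.ofList [start]) [start]
    (by rw [hof]; simp)
    (by rw [hof]; intro v hv; exact hv)
    (by rw [hof]; intro v hv; simp at hv; subst hv; exact hstart)
    (by rw [hof]; intro v hv; simp at hv; subst hv; exact Relation.ReflTransGen.refl)
    (by rw [hof]; simp)
    (by rw [hof]; intro u w hu hnstk _; simp at hu; subst hu;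
        exact absurd (List.mem_cons_self) hnstk)
    (by
      have h := length_filter_not_append (start :: rest) hV [] start hstart (by simp)
      simp only [List.nil_append, List.not_mem_nil, not_false_eq_true, decide_true,
        List.filter_true] at h
      exact le_of_eq h)
  have hcl := closure_mem E (start :: rest) start hstart hRV
  rw [range_foldl_iterate, hof]
  rw [hof] at hdfs
  have hperm : (dfsLoopA (adjA E (start :: rest)) (start :: rest).length
      [start] [start]).Perm ((growB E)^[(start :: rest : List Int).length] [start]) := by
    rw [List.perm_ext_iff_of_nodup hdfs.1 hcl.1]
    intro v
    rw [hdfs.2 v, hcl.2 v]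
  unfold PySem.Set.len
  rw [hperm.length_eq]

-- ===== VERDICT (by name: the statement is the Claim_ definition above) =====
theorem link_is_cycle_spec : Claim_equal_link_is_cycle := by
  intro vertex faces _ _
  unfold Spec_link_is_cycle link_is_cycle link_is_cycle_alt
  rw [stageB_eq_stageA]
  have hV := stageA_snd_nodup vertex faces
  have hsub := flat_subset_verts vertex faces
  revert hV hsub
  generalize stageA vertex faces = st
  obtain ⟨E, V⟩ := st
  intro hV hsub
  simp only
  rw [guard_eq E V hV hsub]
  cases hg : V.any (fun v => decide ((degB E).getD v 0 ≠ 2)) with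
  | true => simp
  | false =>
    simp only [Bool.false_eq_true, if_false]
    cases V with
    | nil => rfl
    | cons start rest =>
      dsimp only
      rw [lens_eq E start rest hV hsub]
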